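-- pv_equiv track=rewrite | github.com/JayBhatt2021/python-basics-i | src/section7/WeeklyHours.py | calculate_weekly_hours
-- ===== SOURCE A (Python) =====
-- from typing import List
--
-- def calculate_weekly_hours(work_hours: List[int]) -> List[int]:
--     """Calculate and return the weekly work hours for each employee.
--
--     :param work_hours: A list of daily work hours.
--     :return: A list containing the weekly work hours for each employee.
--     """
--     week_hours_list = []
--
--     week_hours = 0
--     for i, day_hours in enumerate(work_hours, start=1):
--         week_hours += day_hours
--
--         # Checks if it is the last day of the week
--         if i % 7 == 0:
--             # Adds the accumulated hours for the week to the list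
--             week_hours_list.append(week_hours)
--
--             # Resets the weekly hours counter for the next week
--             week_hours = 0
--
--     return week_hours_list
-- ===== SOURCE B (Python) =====
-- from typing import List
--
-- def calculate_weekly_hours(work_hours: List[int]) -> List[int]:
--     weeks = len(work_hours) // 7
--     return [sum(work_hours[w * 7 : w * 7 + 7]) for w in range(weeks)]
-- ===== Notes on version B (the rewrite author's own statement) =====
-- stated objective: simpler
-- what changed: Replaces the streaming accumulator with its reset-every-7th-day counter by computing the number of complete weeks up front and summing each 7-day slice in a comprehension.
import Mathlib
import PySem

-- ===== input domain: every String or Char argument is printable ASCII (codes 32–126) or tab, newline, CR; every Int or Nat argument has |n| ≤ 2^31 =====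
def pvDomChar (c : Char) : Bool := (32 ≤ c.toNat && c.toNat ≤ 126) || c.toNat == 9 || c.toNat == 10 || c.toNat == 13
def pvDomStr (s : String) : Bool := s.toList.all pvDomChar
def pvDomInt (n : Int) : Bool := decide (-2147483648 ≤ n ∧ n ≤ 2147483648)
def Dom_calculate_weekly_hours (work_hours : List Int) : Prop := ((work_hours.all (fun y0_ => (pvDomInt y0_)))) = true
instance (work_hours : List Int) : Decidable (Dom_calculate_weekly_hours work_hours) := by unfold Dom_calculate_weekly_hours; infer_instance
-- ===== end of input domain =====

-- B chunks the list by computed slice indices (len // 7 complete weeks) instead of A's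
-- running accumulator reset every 7th day; objective: simpler.

-- ===== PORT A =====
-- the enumerate(…, start=1) loop: i is the 1-based day counter, week_hours the running sum,
-- week_hours_list the output accumulator
def pvGoA : List Int → Nat → Int → List Int → List Int
  | [], _, _, week_hours_list => week_hours_list
  | day_hours :: rest, i, week_hours, week_hours_list =>
    let week_hours := week_hours + day_hours
    if (i + 1) % 7 = 0 then
      pvGoA rest (i + 1) 0 (week_hours_list ++ [week_hours])
    else
      pvGoA rest (i + 1) week_hours week_hours_list

def calculate_weekly_hours (work_hours : List Int) : List Int :=
  pvGoA work_hours 0 0 []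

-- ===== PORT B =====
def calculate_weekly_hours_alt (work_hours : List Int) : List Int :=
  let weeks := work_hours.length / 7
  (List.range weeks).map (fun (w : Nat) =>
    (PySem.List.slice work_hours (some ((w : Int) * 7)) (some ((w : Int) * 7 + 7))).sum)

-- ===== PRECONDITION & SPEC =====
def Spec_calculate_weekly_hours (work_hours : List Int) (out : List Int) : Prop := out = calculate_weekly_hours_alt work_hours
instance (work_hours : List Int) (out : List Int) : Decidable (Spec_calculate_weekly_hours work_hours out) := by unfold Spec_calculate_weekly_hours; infer_instance

-- ===== CLAIM (what is proved, stated in full; the proofs are below) =====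
def Claim_equal_calculate_weekly_hours : Prop := ∀ (work_hours : List Int), Dom_calculate_weekly_hours work_hours → Spec_calculate_weekly_hours work_hours (calculate_weekly_hours work_hours)

-- ===== LEMMAS AND PROOFS =====

-- the chunked-sum form both sides reduce to
def pvChunks (ws : List Int) : List Int :=
  (List.range (ws.length / 7)).map (fun w => ((ws.drop (w * 7)).take 7).sum)

lemma pvGoA_short (ws : List Int) : ∀ (i : Nat) (wh : Int) (out : List Int),
    i % 7 + ws.length < 7 → pvGoA ws i wh out = out := by
  induction ws with
  | nil => intro i wh out _; rfl
  | cons a t ih =>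
    intro i wh out h
    simp only [List.length_cons] at h
    have h1 : (i + 1) % 7 ≠ 0 := by omega
    have h2 : (i + 1) % 7 + t.length < 7 := by omega
    simp only [pvGoA, if_neg h1]
    exact ih (i + 1) (wh + a) out h2

lemma pvGoA_chunks (n : Nat) : ∀ (ws : List Int), ws.length = n → ∀ (i : Nat) (out : List Int),
    i % 7 = 0 → pvGoA ws i 0 out = out ++ pvChunks ws := by
  induction n using Nat.strong_induction_on with
  | _ n ih =>
    intro ws hlen i out hi
    by_cases hsmall : ws.length < 7
    · have : ws.length / 7 = 0 := by omega
      rw [pvGoA_short ws i 0 out (by omega)]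
      simp [pvChunks, this]
    · match ws, hlen with
      | a :: b :: c :: d :: e :: f :: g :: t, hlen =>
        have s1 : (i + 1) % 7 ≠ 0 := by omega
        have s2 : (i + 2) % 7 ≠ 0 := by omega
        have s3 : (i + 3) % 7 ≠ 0 := by omega
        have s4 : (i + 4) % 7 ≠ 0 := by omega
        have s5 : (i + 5) % 7 ≠ 0 := by omega
        have s6 : (i + 6) % 7 ≠ 0 := by omega
        have s7 : (i + 7) % 7 = 0 := by omega
        simp only [pvGoA, if_neg s1, if_neg s2, if_neg s3, if_neg s4, if_neg s5, if_neg s6,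
          show i+1+1 = i+2 by omega, show i+2+1 = i+3 by omega, show i+3+1 = i+4 by omega,
          show i+4+1 = i+5 by omega, show i+5+1 = i+6 by omega, show i+6+1 = i+7 by omega,
          if_pos s7]
        have htl : t.length < n := by simp at hlen; omega
        rw [ih t.length htl t rfl (i + 7) _ s7]
        have hchunk : pvChunks (a :: b :: c :: d :: e :: f :: g :: t)
            = (0 + a + b + c + d + e + f + g) :: pvChunks t := by
          unfold pvChunks
          have hlen7 : (a :: b :: c :: d :: e :: f :: g :: t).length / 7 = t.length / 7 + 1 := by
            simp [List.length_cons]; omega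
          rw [hlen7, List.range_succ_eq_map, List.map_cons, List.map_map]
          congr 1
          · simp; ring
          · apply List.map_congr_left
            intro w _
            simp only [Function.comp_apply]
            have : Nat.succ w * 7 = w * 7 + 7 := by omega
            rw [this]
            congr 1
        rw [hchunk]
        simp
      | [], hlen => simp at hsmall
      | [a], hlen => simp at hsmall
      | [a,b], hlen => simp at hsmall
      | [a,b,c], hlen => simp at hsmall
      | [a,b,c,d], hlen => simp at hsmall
      | [a,b,c,d,e], hlen => simp at hsmall
      | [a,b,c,d,e,f], hlen => simp at hsmall

lemma alt_eq_chunks (ws : List Int) : calculate_weekly_hours_alt ws = pvChunks ws := by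
  unfold calculate_weekly_hours_alt pvChunks
  apply List.map_congr_left
  intro w _
  rw [show ((w : Int) * 7) = ((w * 7 : Nat) : Int) by push_cast; ring,
    show (((w * 7 : Nat) : Int) + 7) = (((w * 7 : Nat) : Int) + ((7 : Nat) : Int)) by norm_num,
    PySem.List.slice_natCast_add]

-- ===== VERDICT (by name: the statement is the Claim_ definition above) =====
theorem calculate_weekly_hours_spec : Claim_equal_calculate_weekly_hours := by
  intro ws _
  unfold Spec_calculate_weekly_hours
  rw [alt_eq_chunks]
  unfold calculate_weekly_hours
  rw [pvGoA_chunks ws.length ws rfl 0 [] rfl]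
  simp
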